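-- pv_equiv track=rewrite | github.com/dhkang184/code_QA | codility/F-04.py | solution
-- ===== SOURCE A (Python) =====
-- def solution(S):
--     if len(S) == 1:
--         return 0
--     elif len(S) ==0:
--         return -1
--     elif len(S) %2 ==0:
--         return -1
--
--     mid_idx = len(S)//2
--     for i in range(mid_idx +1):
--         left_idx = i
--         right_idx = -(i+1)
--         if S[left_idx] != S[right_idx]:
--             return -1
--
--     return mid_idx
-- ===== SOURCE B (Python) =====
-- def solution(S):
--     return len(S) // 2 if len(S) % 2 == 1 and S == S[::-1] else -1
-- ===== Notes on version B (the rewrite author's own statement) =====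
-- stated objective: simpler
-- what changed: Replaces the two-pointer index loop (with separate length-0/1/even guards) by a single expression: odd length and reverse-and-compare palindrome test, returning len(S)//2 or -1.
import Mathlib
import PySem

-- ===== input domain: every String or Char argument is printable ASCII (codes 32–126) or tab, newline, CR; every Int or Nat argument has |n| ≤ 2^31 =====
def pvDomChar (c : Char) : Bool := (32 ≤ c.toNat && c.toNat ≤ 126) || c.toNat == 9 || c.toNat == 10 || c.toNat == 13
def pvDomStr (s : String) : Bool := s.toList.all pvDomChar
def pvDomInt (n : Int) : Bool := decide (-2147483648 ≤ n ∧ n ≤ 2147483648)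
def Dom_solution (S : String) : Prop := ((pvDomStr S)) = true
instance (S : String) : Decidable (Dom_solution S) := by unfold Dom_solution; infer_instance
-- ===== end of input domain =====

-- B replaces A's two-pointer index loop (and its separate length guards) by a single
-- odd-length test plus reverse-and-compare expression; objective: simpler.

-- ===== PORT A =====
-- the for-loop with its early 'return -1'; on the inputs that reach it the indices i and
-- -(i+1) are always in range (odd length, i ≤ mid), so pyGetD is exact here
def solGoA (l : List Char) (mid : Int) : List Int → Int
  | [] => mid
  | i :: rest =>
    if PySem.List.pyGetD l i ' ' ≠ PySem.List.pyGetD l (-(i+1)) ' ' then -1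
    else solGoA l mid rest

def solution (S : String) : Int :=
  let l := S.toList
  let n : Int := l.length
  if n = 1 then 0
  else if n = 0 then -1
  else if PySem.Int.mod n 2 = 0 then -1
  else
    let mid := PySem.Int.floordiv n 2
    solGoA l mid (PySem.List.pyRange 0 (mid + 1) 1)

-- ===== PORT B =====
def solution_alt (S : String) : Int :=
  let n : Int := PySem.Str.len S
  if PySem.Int.mod n 2 = 1 ∧ some S = PySem.Str.slice? S none none (-1) then
    PySem.Int.floordiv n 2
  else -1

-- ===== PRECONDITION & SPEC =====
def Spec_solution (S : String) (out : Int) : Prop := out = solution_alt S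
instance (S : String) (out : Int) : Decidable (Spec_solution S out) := by unfold Spec_solution; infer_instance

-- ===== CLAIM (what is proved, stated in full; the proofs are below) =====
def Claim_equal_solution : Prop := ∀ (S : String), Dom_solution S → Spec_solution S (solution S)

-- ===== LEMMAS AND PROOFS =====

-- the loop returns mid iff every compared pair matches, else -1
lemma solGoA_spec (l : List Char) (mid : Int) (idxs : List Int) :
    solGoA l mid idxs =
      if ∀ i ∈ idxs, PySem.List.pyGetD l i ' ' = PySem.List.pyGetD l (-(i+1)) ' ' then mid else -1 := by
  induction idxs with
  | nil => simp [solGoA]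
  | cons i rest ih =>
    by_cases h : PySem.List.pyGetD l i ' ' = PySem.List.pyGetD l (-(i+1)) ' '
    · rw [solGoA, if_neg (not_not_intro h), ih]
      by_cases hr : ∀ j ∈ rest, PySem.List.pyGetD l j ' ' = PySem.List.pyGetD l (-(j+1)) ' '
      · rw [if_pos hr, if_pos (by
          intro j hj
          rcases List.mem_cons.mp hj with rfl | hj
          · exact h
          · exact hr j hj)]
      · rw [if_neg hr, if_neg (fun hall => hr (fun j hj => hall j (List.mem_cons_of_mem _ hj)))]
    · rw [solGoA, if_pos h, if_neg (fun hall => h (hall i (List.mem_cons_self ..)))]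

-- for odd length, the loop's pairwise condition is exactly 'l is a palindrome'
lemma pal_iff (l : List Char) (hodd : l.length % 2 = 1) :
    (∀ i ∈ PySem.List.pyRange 0 ((l.length / 2 : Nat) + 1 : Int) 1,
       PySem.List.pyGetD l i ' ' = PySem.List.pyGetD l (-(i+1)) ' ')
    ↔ l.reverse = l := by
  have hn : 0 < l.length := by omega
  constructor
  · intro h
    have key : ∀ j : Nat, j ≤ l.length / 2 → l[j]? = l[l.length - 1 - j]? := by
      intro j hj
      have hjl : j < l.length := by omega
      have hmem : (j : Int) ∈ PySem.List.pyRange 0 ((l.length / 2 : Nat) + 1 : Int) 1 :=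
        PySem.List.mem_pyRange_one.mpr (by constructor <;> [positivity; exact_mod_cast by omega])
      have hth := h (j : Int) hmem
      rw [PySem.List.pyGetD_eq_getElem l ' ' (by positivity) (by exact_mod_cast hjl)] at hth
      rw [show (-((j:Int)+1)) = -((j+1 : Nat) : Int) by push_cast; ring] at hth
      rw [PySem.List.pyGetD_neg_natCast l (j+1) ' ' (by omega) (by omega)] at hth
      rw [List.getElem?_eq_getElem hjl, List.getElem?_eq_getElem (by omega : l.length - 1 - j < l.length)]
      exact congrArg some (by simpa [show l.length - (j+1) = l.length - 1 - j from by omega] using hth)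
    apply List.ext_getElem?
    intro j
    by_cases hjl : j < l.length
    · rw [List.getElem?_reverse hjl]
      by_cases hj : j ≤ l.length / 2
      · exact (key j hj).symm
      · have hj' : l.length - 1 - j ≤ l.length / 2 := by omega
        have hk := key (l.length - 1 - j) hj'
        rw [show l.length - 1 - (l.length - 1 - j) = j from by omega] at hk
        exact hk
    · rw [List.getElem?_eq_none (by rw [List.length_reverse]; omega),
          List.getElem?_eq_none (by omega)]
  · intro hrev i hi
    obtain ⟨h0, h1⟩ := PySem.List.mem_pyRange_one.mp hi
    obtain ⟨j, rfl⟩ : ∃ j : Nat, i = (j : Int) := ⟨i.toNat, (Int.toNat_of_nonneg h0).symm⟩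
    have hjl : j < l.length := by
      have : j < l.length / 2 + 1 := by exact_mod_cast h1
      omega
    have hopt : l[j]? = l[l.length - 1 - j]? := by
      conv_lhs => rw [← hrev]
      exact List.getElem?_reverse hjl
    rw [PySem.List.pyGetD_eq_getElem l ' ' (by positivity) (by exact_mod_cast hjl)]
    rw [show (-((j:Int)+1)) = -((j+1 : Nat) : Int) by push_cast; ring]
    rw [PySem.List.pyGetD_neg_natCast l (j+1) ' ' (by omega) (by omega)]
    rw [List.getElem?_eq_getElem hjl, List.getElem?_eq_getElem (by omega : l.length - 1 - j < l.length)] at hopt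
    have := Option.some.inj hopt
    simpa [show l.length - (j+1) = l.length - 1 - j from by omega] using this

-- ===== VERDICT (by name: the statement is the Claim_ definition above) =====
theorem solution_spec : Claim_equal_solution := by
  intro S _
  unfold Spec_solution solution solution_alt
  simp only [PySem.Str.len_eq, PySem.Str.slice?_none_none_neg_one]
  have hmod : PySem.Int.mod (S.toList.length : Int) 2 = ((S.toList.length % 2 : Nat) : Int) := by
    exact_mod_cast PySem.Int.mod_natCast S.toList.length 2
  have hdiv : PySem.Int.floordiv (S.toList.length : Int) 2 = ((S.toList.length / 2 : Nat) : Int) := by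
    exact_mod_cast PySem.Int.floordiv_natCast S.toList.length 2
  have hS : (some S = some (String.ofList S.toList.reverse)) ↔ S.toList.reverse = S.toList := by
    constructor
    · intro h
      have := congrArg String.toList (Option.some.inj h)
      simpa using this.symm
    · intro h
      rw [h]
      simp
  by_cases h1 : S.toList.length = 1
  · rw [if_pos (by exact_mod_cast h1)]
    obtain ⟨c, hc⟩ := List.length_eq_one_iff.mp h1
    rw [if_pos ⟨by rw [hmod, h1]; decide, hS.mpr (by rw [hc]; simp)⟩, hdiv, h1]
    decide
  · by_cases h0 : S.toList.length = 0
    · rw [if_neg (by exact_mod_cast h1), if_pos (by exact_mod_cast h0),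
          if_neg (fun hc => by rw [hmod, h0] at hc; exact absurd hc.1 (by decide))]
    · by_cases heven : S.toList.length % 2 = 0
      · rw [if_neg (by exact_mod_cast h1), if_neg (by exact_mod_cast h0),
            if_pos (by rw [hmod, heven]; rfl),
            if_neg (fun hc => by rw [hmod, heven] at hc; exact absurd hc.1 (by decide))]
      · have hodd : S.toList.length % 2 = 1 := by omega
        rw [if_neg (by exact_mod_cast h1), if_neg (by exact_mod_cast h0),
            if_neg (by rw [hmod, hodd]; decide), hdiv, solGoA_spec]
        by_cases hpal : S.toList.reverse = S.toList
        · rw [if_pos ((pal_iff S.toList hodd).mpr hpal),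
              if_pos ⟨by rw [hmod, hodd]; rfl, hS.mpr hpal⟩]
        · rw [if_neg (fun hc => hpal ((pal_iff S.toList hodd).mp hc)),
              if_neg (fun hc => hpal (hS.mp hc.2))]
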